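-- pv_equiv track=rewrite | github.com/SailfinIO/sailfin | compiler/build/llvm/expression_lowering_stage2/core.py | replace_llvm_operand
-- ===== SOURCE A (Python) =====
-- def append_llvm_operand(values, value):
--     return (values) + ([value])
--
-- def replace_llvm_operand(values, index, value):
--     result = []
--     current = 0
--     while True:
--         if current >= len(values):
--             break
--         if current == index:
--             result = append_llvm_operand(result, value)
--         else:
--             result = append_llvm_operand(result, values[current])
--         current += 1
--     return result
-- ===== SOURCE B (Python) =====
-- def replace_llvm_operand(values, index, value):
--     if 0 <= index < len(values):
--         return values[:index] + [value] + values[index + 1:]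
--     return list(values)
-- ===== Notes on version B (the rewrite author's own statement) =====
-- stated objective: simpler
-- what changed: Replaced the element-by-element while loop (with an append helper) by a range guard plus slice concatenation values[:index] + [value] + values[index+1:], falling back to a plain copy when the index is out of range.
import Mathlib
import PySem

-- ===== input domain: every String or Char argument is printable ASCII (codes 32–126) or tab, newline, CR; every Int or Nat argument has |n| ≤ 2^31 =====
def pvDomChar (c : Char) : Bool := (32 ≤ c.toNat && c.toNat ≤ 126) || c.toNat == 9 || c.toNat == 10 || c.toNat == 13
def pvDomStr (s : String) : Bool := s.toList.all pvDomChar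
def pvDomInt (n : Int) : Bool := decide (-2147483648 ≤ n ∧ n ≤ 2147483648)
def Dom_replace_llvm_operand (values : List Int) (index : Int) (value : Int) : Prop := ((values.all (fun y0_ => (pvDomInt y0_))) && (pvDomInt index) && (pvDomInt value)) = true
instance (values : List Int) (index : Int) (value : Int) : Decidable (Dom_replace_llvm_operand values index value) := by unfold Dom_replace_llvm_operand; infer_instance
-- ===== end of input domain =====

-- B replaces A's element-by-element copy loop by a range guard plus slice
-- concatenation (simpler decomposition); return values proved equal on all inputs.

-- ===== PORT A =====
-- Transliteration of A: the `while True` loop walks `current` from 0, appending via the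
-- `append_llvm_operand` helper; `values[current]` is always in range (0 ≤ current < len),
-- so `values.getD current 0` is exact there.
def append_llvm_operand (values : List Int) (value : Int) : List Int :=
  values ++ [value]

def replaceLoop (values : List Int) (index : Int) (value : Int)
    (current : Nat) (result : List Int) : List Int :=
  if values.length ≤ current then result
  else
    replaceLoop values index value (current + 1)
      (if (current : Int) = index then append_llvm_operand result value
       else append_llvm_operand result (values.getD current 0))
termination_by values.length - current
decreasing_by omega

def replace_llvm_operand (values : List Int) (index : Int) (value : Int) : List Int :=
  replaceLoop values index value 0 []

-- ===== PORT B =====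
-- B: range guard plus slice concatenation; out-of-range index yields a plain copy.
def replace_llvm_operand_alt (values : List Int) (index : Int) (value : Int) : List Int :=
  if 0 ≤ index ∧ index < (values.length : Int) then
    PySem.List.slice values none (some index) ++ [value]
      ++ PySem.List.slice values (some (index + 1)) none
  else values

-- ===== PRECONDITION & SPEC =====
def Spec_replace_llvm_operand (values : List Int) (index : Int) (value : Int) (out : List Int) : Prop := out = replace_llvm_operand_alt values index value
instance (values : List Int) (index : Int) (value : Int) (out : List Int) : Decidable (Spec_replace_llvm_operand values index value out) := by unfold Spec_replace_llvm_operand; infer_instance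

-- ===== CLAIM (what is proved, stated in full; the proofs are below) =====
def Claim_equal_replace_llvm_operand : Prop := ∀ (values : List Int) (index : Int) (value : Int), Dom_replace_llvm_operand values index value → Spec_replace_llvm_operand values index value (replace_llvm_operand values index value)

-- ===== LEMMAS AND PROOFS =====

-- What the loop body writes at position i.
def loopElem (values : List Int) (index : Int) (value : Int) (i : Nat) : Int :=
  if (i : Int) = index then value else values.getD i 0

lemma replaceLoop_spec (values : List Int) (index value : Int) :
    ∀ (n current : Nat) (result : List Int), values.length = current + n →
      replaceLoop values index value current result
        = result ++ (List.range' current n).map (loopElem values index value) := by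
  intro n
  induction n with
  | zero =>
      intro current result h
      rw [replaceLoop]
      simp [h]
  | succ n ih =>
      intro current result h
      rw [replaceLoop]
      have hlt : ¬ values.length ≤ current := by omega
      rw [if_neg hlt, ih (current + 1) _ (by omega)]
      have hbody :
          (if (current : Int) = index then append_llvm_operand result value
           else append_llvm_operand result (values.getD current 0))
            = result ++ [loopElem values index value current] := by
        unfold loopElem append_llvm_operand
        split_ifs <;> rfl
      rw [hbody, List.range'_succ, List.map_cons]
      simp

lemma map_getD_range' (values : List Int) :
    ∀ (n a : Nat), a + n ≤ values.length →
      (List.range' a n).map (fun i => values.getD i 0) = (values.drop a).take n := by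
  intro n
  induction n with
  | zero => intro a _; simp
  | succ n ih =>
      intro a h
      have ha : a < values.length := by omega
      rw [List.range'_succ, List.map_cons, ih (a + 1) (by omega),
        List.drop_eq_getElem_cons ha, List.take_succ_cons,
        List.getD_eq_getElem values 0 ha]

-- ===== VERDICT (by name: the statement is the Claim_ definition above) =====
theorem replace_llvm_operand_spec : Claim_equal_replace_llvm_operand := by
  intro values index value _
  unfold Spec_replace_llvm_operand replace_llvm_operand replace_llvm_operand_alt
  rw [replaceLoop_spec values index value values.length 0 [] (by omega), List.nil_append]
  by_cases hin : 0 ≤ index ∧ index < (values.length : Int)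
  · rw [if_pos hin]
    obtain ⟨h0, h1⟩ := hin
    set j := index.toNat with hj
    have hjlt : j < values.length := by omega
    have hsplit : List.range' 0 values.length
        = List.range' 0 j ++ j :: List.range' (j + 1) (values.length - j - 1) := by
      have happ := List.range'_append (s := 0) (m := j) (n := values.length - j) (step := 1)
      simp only [Nat.zero_add, Nat.one_mul] at happ
      rw [Nat.add_sub_cancel' (Nat.le_of_lt hjlt)] at happ
      rw [← happ]
      congr 1
      rw [show values.length - j = (values.length - j - 1) + 1 from by omega, List.range'_succ]
      simp
    rw [hsplit, List.map_append, List.map_cons]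
    have hpre : (List.range' 0 j).map (loopElem values index value)
        = (List.range' 0 j).map (fun i => values.getD i 0) := by
      apply List.map_congr_left
      intro i hi
      have : i < j := by
        have := List.mem_range'_1.mp hi
        omega
      unfold loopElem
      rw [if_neg (by omega)]
    have hsuf : (List.range' (j + 1) (values.length - j - 1)).map (loopElem values index value)
        = (List.range' (j + 1) (values.length - j - 1)).map (fun i => values.getD i 0) := by
      apply List.map_congr_left
      intro i hi
      have : j + 1 ≤ i := (List.mem_range'_1.mp hi).1
      unfold loopElem
      rw [if_neg (by omega)]
    have hmid : loopElem values index value j = value := by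
      unfold loopElem
      rw [if_pos (by omega)]
    rw [hpre, hsuf, hmid,
      map_getD_range' values j 0 (by omega),
      map_getD_range' values (values.length - j - 1) (j + 1) (by omega),
      PySem.List.slice_to values h0, PySem.List.slice_from values (by omega : (0:Int) ≤ index + 1)]
    have hj1 : (index + 1).toNat = j + 1 := by omega
    rw [hj1, List.drop_zero,
      List.take_of_length_le
        (by rw [List.length_drop]; omega : (values.drop (j + 1)).length ≤ values.length - j - 1)]
    simp [hj]
  · rw [if_neg hin]
    have : (List.range' 0 values.length).map (loopElem values index value)
        = (List.range' 0 values.length).map (fun i => values.getD i 0) := by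
      apply List.map_congr_left
      intro i hi
      have hi' : i < values.length := by
        have := List.mem_range'_1.mp hi
        omega
      unfold loopElem
      rw [if_neg (by
        intro hiq
        exact hin ⟨by omega, by omega⟩)]
    rw [this, map_getD_range' values values.length 0 (by omega)]
    simp
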